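-- pv_equiv track=rewrite | github.com/GinOwO/CodeForces | Codeforces/1857_Codeforces Round 891 (Div. 3)/B_Maximum Rounding/1857B.py | ilog
-- ===== SOURCE A (Python) =====
-- def ilog(n):
--     """returns the smallest a, b s.t. a**b = n for integer a, b"""
--     a = n.bit_length()
--     for b in range(a, 0, -1):
--         lo, hi = 1, 1 << (a // b + 1)
--         while lo < hi:
--             mi = (lo + hi) // 2
--             a_b = mi**b
--             if a_b == n:
--                 return mi, b
--             if a_b > n:
--                 hi = mi
--             else:
--                 lo = mi + 1
-- ===== SOURCE B (Python) =====
-- def ilog(n):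
--     """returns the smallest a, b s.t. a**b = n for integer a, b"""
--     if n <= 0:
--         return None
--     if n == 1:
--         return 1, 1
--     a = 2
--     while a * a <= n:
--         p, b = a, 1
--         while p < n:
--             p *= a
--             b += 1
--         if p == n:
--             return a, b
--         a += 1
--     return n, 1
-- ===== Notes on version B (the rewrite author's own statement) =====
-- stated objective: alternative
-- what changed: Instead of scanning exponents b downward and binary-searching a base for each, B scans candidate bases upward to the square root, growing the power by repeated multiplication, and returns the smallest base (which carries the maximal exponent); non-powers fall out directly.
import Mathlib
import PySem

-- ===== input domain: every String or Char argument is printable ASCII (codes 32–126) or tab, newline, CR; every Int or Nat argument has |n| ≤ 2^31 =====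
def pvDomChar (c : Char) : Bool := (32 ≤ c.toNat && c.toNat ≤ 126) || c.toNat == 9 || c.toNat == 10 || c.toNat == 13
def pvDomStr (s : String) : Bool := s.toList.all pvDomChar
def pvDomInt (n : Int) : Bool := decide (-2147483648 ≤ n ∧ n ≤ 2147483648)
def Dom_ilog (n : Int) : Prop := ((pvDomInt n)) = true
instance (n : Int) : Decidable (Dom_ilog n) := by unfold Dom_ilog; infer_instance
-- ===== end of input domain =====

-- B replaces A's descending-exponent loop with per-exponent binary search by an ascending scan of
-- candidate bases up to sqrt(n) (smallest base = largest exponent); alternative algorithm, no speed claim.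

-- ===== PORT A =====
-- the inner 'while lo < hi' binary search of A, as well-founded recursion on hi - lo
def ilogSearch (n b lo hi : Int) : Option Int :=
  if h : lo < hi then
    let mi := PySem.Int.floordiv (lo + hi) 2
    let a_b := mi ^ b.toNat          -- mi**b; b ≥ 1 on every call A makes
    if a_b = n then some mi
    else if a_b > n then ilogSearch n b lo mi
    else ilogSearch n b (mi + 1) hi
  else none
termination_by (hi - lo).toNat
decreasing_by
  · have h1 : PySem.Int.floordiv (lo + hi) 2 < hi :=
      (PySem.Int.floordiv_lt_iff_lt_mul (by omega)).mpr (by omega)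
    have h2 : lo ≤ PySem.Int.floordiv (lo + hi) 2 :=
      (PySem.Int.le_floordiv_iff_mul_le (by omega)).mpr (by omega)
    omega
  · have h1 : PySem.Int.floordiv (lo + hi) 2 < hi :=
      (PySem.Int.floordiv_lt_iff_lt_mul (by omega)).mpr (by omega)
    have h2 : lo ≤ PySem.Int.floordiv (lo + hi) 2 :=
      (PySem.Int.le_floordiv_iff_mul_le (by omega)).mpr (by omega)
    omega

-- A's 'for b in range(a, 0, -1)' loop; returns at the first successful search
def ilogOuter (n a : Int) : List Int → Option (Int × Int)
  | [] => none
  | b :: bs =>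
    match ilogSearch n b 1 ((2 : Int) ^ ((PySem.Int.floordiv a b + 1).toNat)) with
      -- hi = 1 << (a // b + 1); the exponent is ≥ 0 on every call A makes (1 ≤ b ≤ a)
    | some mi => some (mi, b)
    | none => ilogOuter n a bs

def ilog (n : Int) : Option (Int × Int) :=
  let a : Int := (PySem.Int.bitLength n : Int)   -- a = n.bit_length()
  ilogOuter n a (PySem.List.pyRange a 0 (-1))

-- ===== PORT B =====
-- B's inner 'while p < n: p *= a; b += 1'
def growPow (n a : Int) (ha : 2 ≤ a) : (p : Int) → (b : Int) → 1 ≤ p → Int × Int :=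
  fun p b hp =>
    if h : p < n then growPow n a ha (p * a) (b + 1) (by nlinarith)
    else (p, b)
termination_by p b _ => (n - p).toNat
decreasing_by
  have : p + 1 ≤ p * a := by nlinarith
  omega

-- B's 'while a * a <= n' loop over candidate bases
def altLoop (n : Int) (hn : 2 ≤ n) : (a : Int) → 2 ≤ a → Option (Int × Int) :=
  fun a ha =>
    if h : a * a ≤ n then
      let pb := growPow n a ha a 1 (by omega)
      if pb.1 = n then some (a, pb.2)
      else altLoop n hn (a + 1) (by omega)
    else some (n, 1)
termination_by a _ => (n - a).toNat
decreasing_by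
  have : a < n := by nlinarith
  omega

def ilog_alt (n : Int) : Option (Int × Int) :=
  if h0 : n ≤ 0 then none
  else if h1 : n = 1 then some (1, 1)
  else altLoop n (by omega) 2 (by omega)

-- ===== PRECONDITION & SPEC =====
def Spec_ilog (n : Int) (out : Option (Int × Int)) : Prop := out = ilog_alt n
instance (n : Int) (out : Option (Int × Int)) : Decidable (Spec_ilog n out) := by unfold Spec_ilog; infer_instance

-- ===== CLAIM (what is proved, stated in full; the proofs are below) =====
def Claim_equal_ilog : Prop := ∀ (n : Int), Dom_ilog n → Spec_ilog n (ilog n)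

-- ===== LEMMAS AND PROOFS =====

-- (m, b) represents n as a perfect power m^b (bases ≥ 2; for n ≥ 2 the base 1 is impossible anyway)
def IsRep (n m b : Int) : Prop := 2 ≤ m ∧ 1 ≤ b ∧ m ^ b.toNat = n

-- the descending list [k, k-1, …, 1] that range(a, 0, -1) produces
def descList : Nat → List Int
  | 0 => []
  | k + 1 => ((k : Int) + 1) :: descList k

theorem descList_eq (k : Nat) :
    (List.range k).map (fun i : Nat => ((k : Int) - i)) = descList k := by
  induction k with
  | zero => simp [descList]
  | succ k ih =>
    rw [List.range_succ_eq_map, descList, List.map_cons, List.map_map]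
    refine List.cons_eq_cons.mpr ⟨by push_cast; ring, ?_⟩
    rw [← ih]
    apply List.map_congr_left
    intro i _
    simp only [Function.comp_apply]
    push_cast
    ring

theorem pyRange_desc (a : Int) (ha : 0 ≤ a) :
    PySem.List.pyRange a 0 (-1) = descList a.toNat := by
  obtain ⟨k, rfl⟩ : ∃ k : Nat, a = (k : Int) := ⟨a.toNat, (Int.toNat_of_nonneg ha).symm⟩
  rw [PySem.List.pyRange_neg_one, sub_zero]
  simpa using descList_eq k

theorem pow_big_lt (m1 m2 : Int) (b1 b2 : Nat) (h1 : 2 ≤ m1) (h2 : 2 ≤ m2)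
    (hb : b2 < b1) (he : m1 ^ b1 = m2 ^ b2) : m1 < m2 := by
  by_contra hcon
  push_neg at hcon   -- m2 ≤ m1
  have h1' : m2 ^ b2 ≤ m1 ^ b2 := pow_le_pow_left₀ (by omega) hcon b2
  have h2' : m1 ^ b2 < m1 ^ b1 := pow_lt_pow_right₀ (by omega) hb
  omega

theorem rep_exp_le (n m1 b1 m2 b2 : Int) (r1 : IsRep n m1 b1) (r2 : IsRep n m2 b2)
    (hm : m1 ≤ m2) : b2 ≤ b1 := by
  obtain ⟨hm1, hb1, he1⟩ := r1
  obtain ⟨hm2, hb2, he2⟩ := r2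
  by_contra hcon
  push_neg at hcon   -- b1 < b2
  have hbn : b1.toNat < b2.toNat := by omega
  have := pow_big_lt m2 m1 b2.toNat b1.toNat hm2 hm1 hbn (by rw [he1, he2])
  omega

theorem search_some (n b : Int) (hb : 1 ≤ b) :
    ∀ (k : Nat) (lo hi m : Int), (hi - lo).toNat ≤ k → 1 ≤ lo → lo ≤ m → m < hi →
      m ^ b.toNat = n → ilogSearch n b lo hi = some m := by
  intro k
  induction k with
  | zero => intro lo hi m hk hlo hm hmhi hpow; omega
  | succ k ih =>
    intro lo hi m hk hlo hm hmhi hpow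
    have hlt : lo < hi := by omega
    have h1 : PySem.Int.floordiv (lo + hi) 2 < hi :=
      (PySem.Int.floordiv_lt_iff_lt_mul (by omega)).mpr (by omega)
    have h2 : lo ≤ PySem.Int.floordiv (lo + hi) 2 :=
      (PySem.Int.le_floordiv_iff_mul_le (by omega)).mpr (by omega)
    rw [ilogSearch]
    simp only [dif_pos hlt]
    set mi := PySem.Int.floordiv (lo + hi) 2 with hmi
    by_cases he : mi ^ b.toNat = n
    · rw [if_pos he]
      have : mi = m := by
        rcases lt_trichotomy mi m with h | h | h
        · have := pow_lt_pow_left₀ h (by omega : (0:Int) ≤ mi) (by omega : b.toNat ≠ 0)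
          omega
        · exact h
        · have := pow_lt_pow_left₀ h (by omega : (0:Int) ≤ m) (by omega : b.toNat ≠ 0)
          omega
      rw [this]
    · rw [if_neg he]
      by_cases hgt : mi ^ b.toNat > n
      · rw [if_pos hgt]
        have hmmi : m < mi := by
          by_contra hcon
          push_neg at hcon
          have := pow_le_pow_left₀ (by omega : (0:Int) ≤ mi) hcon b.toNat
          omega
        exact ih lo mi m (by omega) hlo hm hmmi hpow
      · rw [if_neg hgt]
        have hmim : mi < m := by
          by_contra hcon
          push_neg at hcon
          have := pow_le_pow_left₀ (by omega : (0:Int) ≤ m) hcon b.toNat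
          omega
        exact ih (mi + 1) hi m (by omega) (by omega) (by omega) hmhi hpow

theorem search_none (n b : Int) :
    ∀ (k : Nat) (lo hi : Int), (hi - lo).toNat ≤ k →
      (∀ m : Int, lo ≤ m → m < hi → m ^ b.toNat ≠ n) → ilogSearch n b lo hi = none := by
  intro k
  induction k with
  | zero =>
    intro lo hi hk hno
    rw [ilogSearch, dif_neg (by omega : ¬ lo < hi)]
  | succ k ih =>
    intro lo hi hk hno
    by_cases hlt : lo < hi
    · have h1 : PySem.Int.floordiv (lo + hi) 2 < hi :=
        (PySem.Int.floordiv_lt_iff_lt_mul (by omega)).mpr (by omega)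
      have h2 : lo ≤ PySem.Int.floordiv (lo + hi) 2 :=
        (PySem.Int.le_floordiv_iff_mul_le (by omega)).mpr (by omega)
      rw [ilogSearch]
      simp only [dif_pos hlt]
      set mi := PySem.Int.floordiv (lo + hi) 2 with hmi
      rw [if_neg (hno mi h2 h1)]
      by_cases hgt : mi ^ b.toNat > n
      · rw [if_pos hgt]
        exact ih lo mi (by omega) (fun m hm1 hm2 => hno m hm1 (by omega))
      · rw [if_neg hgt]
        exact ih (mi + 1) hi (by omega) (fun m hm1 hm2 => hno m (by omega) hm2)
    · rw [ilogSearch, dif_neg hlt]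

theorem rep_lt_hi (n m b : Int) (hn : 1 ≤ n) (hm : 1 ≤ m) (hb : 1 ≤ b)
    (hpow : m ^ b.toNat = n) :
    m < 2 ^ ((PySem.Int.floordiv (PySem.Int.bitLength n : Int) b + 1).toNat) := by
  have hA0 : (0 : Int) ≤ (PySem.Int.bitLength n : Int) := Int.natCast_nonneg _
  have hq0 : 0 ≤ PySem.Int.floordiv (PySem.Int.bitLength n : Int) b :=
    (PySem.Int.le_floordiv_iff_mul_le (by omega)).mpr (by omega)
  set A : Int := (PySem.Int.bitLength n : Int) with hA
  set q : Int := PySem.Int.floordiv A b with hq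
  have hbr : q * b ≤ A ∧ A < (q + 1) * b :=
    (PySem.Int.floordiv_eq_iff_of_pos (by omega)).mp hq.symm
  have hnA : n < 2 ^ PySem.Int.bitLength n := by
    have h := PySem.Int.lt_two_pow_bitLength n
    have h' : ((n.natAbs : Nat) : Int) < ((2 : Int)) ^ PySem.Int.bitLength n := by
      exact_mod_cast h
    rwa [Int.natAbs_of_nonneg (by omega)] at h'
  have hexp : PySem.Int.bitLength n < (q + 1).toNat * b.toNat := by
    have h1 : ((q + 1).toNat : Int) = q + 1 := by omega
    have h2 : (b.toNat : Int) = b := by omega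
    have h3 : (((q + 1).toNat * b.toNat : Nat) : Int) = (q + 1) * b := by
      push_cast [h1, h2]; ring
    omega
  have hpow2 : (2 : Int) ^ PySem.Int.bitLength n < 2 ^ ((q + 1).toNat * b.toNat) :=
    pow_lt_pow_right₀ (by norm_num) hexp
  have hmb : m ^ b.toNat < ((2 : Int) ^ (q + 1).toNat) ^ b.toNat := by
    rw [← pow_mul]
    omega
  by_contra hcon
  push_neg at hcon
  have := pow_le_pow_left₀ (by positivity : (0:Int) ≤ 2 ^ (q + 1).toNat) hcon b.toNat
  omega

theorem rep_exp_le_bitLength (n m b : Int) (hn : 2 ≤ n) (hrep : IsRep n m b) :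
    b ≤ (PySem.Int.bitLength n : Int) := by
  obtain ⟨hm, hb, he⟩ := hrep
  have h1 : (2 : Int) ^ b.toNat ≤ m ^ b.toNat := pow_le_pow_left₀ (by omega) hm b.toNat
  have h2 : (n : Int) < 2 ^ PySem.Int.bitLength n := by
    have h := PySem.Int.lt_two_pow_bitLength n
    have h' : ((n.natAbs : Nat) : Int) < ((2 : Int)) ^ PySem.Int.bitLength n := by
      exact_mod_cast h
    rwa [Int.natAbs_of_nonneg (by omega)] at h'
  have h3 : (2 : Int) ^ b.toNat < 2 ^ PySem.Int.bitLength n := by omega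
  have h4 : b.toNat < PySem.Int.bitLength n := by
    by_contra hcon
    push_neg at hcon
    have := pow_le_pow_right₀ (by norm_num : (1 : Int) ≤ 2) hcon
    omega
  omega

theorem outer_spec (n m0 b0 : Int) (hn : 2 ≤ n) (hrep : IsRep n m0 b0)
    (hmax : ∀ m b, IsRep n m b → b ≤ b0) :
    ∀ k : Nat, b0 ≤ (k : Int) → (k : Int) ≤ (PySem.Int.bitLength n : Int) →
      ilogOuter n (PySem.Int.bitLength n : Int) (descList k) = some (m0, b0) := by
  intro k
  induction k with
  | zero =>
    intro hb0 _
    obtain ⟨_, hb1, _⟩ := hrep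
    omega
  | succ k ih =>
    intro hbk hka
    obtain ⟨hm0, hb0, he0⟩ := hrep
    rw [descList, ilogOuter]
    by_cases hbeq : b0 = (k : Int) + 1
    · have hlt := rep_lt_hi n m0 b0 (by omega) (by omega) hb0 he0
      rw [hbeq] at hlt
      have hs : ilogSearch n ((k : Int) + 1) 1
          ((2 : Int) ^ ((PySem.Int.floordiv (PySem.Int.bitLength n : Int) ((k : Int) + 1) + 1).toNat)) = some m0 := by
        apply search_some n ((k : Int) + 1) (by omega)
          ((2 : Int) ^ ((PySem.Int.floordiv (PySem.Int.bitLength n : Int) ((k : Int) + 1) + 1).toNat)).toNat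
          1 _ m0 (by omega) (by omega) (by omega) hlt
        rw [← hbeq]
        exact he0
      rw [hs, hbeq]
    · have hnone : ilogSearch n ((k : Int) + 1) 1
          ((2 : Int) ^ ((PySem.Int.floordiv (PySem.Int.bitLength n : Int) ((k : Int) + 1) + 1).toNat)) = none := by
        apply search_none n ((k : Int) + 1)
          ((2 : Int) ^ ((PySem.Int.floordiv (PySem.Int.bitLength n : Int) ((k : Int) + 1) + 1).toNat)).toNat
          1 _ (by omega)
        intro m hm1 hm2 hcon
        rcases eq_or_lt_of_le hm1 with h1 | h1
        · rw [← h1] at hcon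
          simp at hcon
          omega
        · have hr : IsRep n m ((k : Int) + 1) := ⟨by omega, by omega, hcon⟩
          have := hmax m ((k : Int) + 1) hr
          omega
      rw [hnone]
      exact ih (by omega) (by omega)

theorem ilog_eq (n m0 b0 : Int) (hn : 2 ≤ n) (hrep : IsRep n m0 b0)
    (hmax : ∀ m b, IsRep n m b → b ≤ b0) : ilog n = some (m0, b0) := by
  show ilogOuter n (PySem.Int.bitLength n : Int)
      (PySem.List.pyRange (PySem.Int.bitLength n : Int) 0 (-1)) = some (m0, b0)
  rw [pyRange_desc _ (Int.natCast_nonneg _), Int.toNat_natCast]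
  exact outer_spec n m0 b0 hn hrep hmax (PySem.Int.bitLength n)
    (rep_exp_le_bitLength n m0 b0 hn hrep) (le_refl _)

theorem outer_none_nonpos (n a : Int) (hn : n ≤ 0) :
    ∀ k : Nat, ilogOuter n a (descList k) = none := by
  intro k
  induction k with
  | zero => simp [descList, ilogOuter]
  | succ k ih =>
    rw [descList, ilogOuter]
    rw [search_none n _ ((2 ^ ((PySem.Int.floordiv a ((k : Int) + 1) + 1).toNat) : Int) - 1).toNat
      _ _ (by omega)]
    · exact ih
    · intro m hm _ hcon
      have : (1 : Int) ≤ m ^ ((k : Int) + 1).toNat := one_le_pow₀ (by omega)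
      omega

theorem growPow_spec (n a : Int) (ha : 2 ≤ a) :
    ∀ (k : Nat) (p b : Int) (hp : 1 ≤ p), (n - p).toNat ≤ k → 1 ≤ b →
      ∃ e : Int, growPow n a ha p b hp = (p * a ^ (e - b).toNat, e) ∧ b ≤ e ∧
        n ≤ p * a ^ (e - b).toNat ∧ ∀ j : Nat, (j : Int) < e - b → p * a ^ j < n := by
  intro k
  induction k with
  | zero =>
    intro p b hp hk hb
    have hnp : ¬ p < n := by omega
    refine ⟨b, ?_, le_refl b, ?_, ?_⟩
    · rw [growPow, dif_neg hnp]
      simp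
    · simp only [sub_self, Int.toNat_zero, pow_zero, mul_one]
      omega
    · intro j hj
      omega
  | succ k ih =>
    intro p b hp hk hb
    by_cases hpn : p < n
    · have hpa : 1 ≤ p * a := by nlinarith
      have hstep : p + 1 ≤ p * a := by nlinarith
      obtain ⟨e, heq, hbe, hle, hsm⟩ := ih (p * a) (b + 1) hpa (by omega) (by omega)
      have hkey : p * a ^ (e - b).toNat = p * a * a ^ (e - (b + 1)).toNat := by
        have h1 : (e - b).toNat = (e - (b + 1)).toNat + 1 := by omega
        rw [h1, pow_succ]
        ring
      refine ⟨e, ?_, by omega, ?_, ?_⟩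
      · rw [growPow, dif_pos hpn, heq, hkey]
      · rw [hkey]
        exact hle
      · intro j hj
        rcases Nat.eq_zero_or_pos j with h0 | h0
        · subst h0
          simpa using hpn
        · obtain ⟨i, rfl⟩ : ∃ i, j = i + 1 := ⟨j - 1, by omega⟩
          have hj' : ((i : Nat) : Int) < e - (b + 1) := by push_cast at hj ⊢; omega
          have hlt := hsm i hj'
          calc p * a ^ (i + 1) = p * a * a ^ i := by rw [pow_succ]; ring
            _ < n := hlt
    · refine ⟨b, ?_, le_refl b, ?_, ?_⟩
      · rw [growPow, dif_neg hpn]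
        simp
      · simp only [sub_self, Int.toNat_zero, pow_zero, mul_one]
        omega
      · intro j hj
        omega

theorem altLoop_base (n a : Int) (hn : 2 ≤ n) (ha : 2 ≤ a) (hbig : ¬ a * a ≤ n)
    (hinv : ∀ m b, IsRep n m b → a ≤ m) :
    IsRep n n 1 ∧ ∀ m b, IsRep n m b → n ≤ m := by
  refine ⟨⟨hn, le_refl 1, by norm_num⟩, ?_⟩
  intro m b hr
  have ham := hinv m b hr
  obtain ⟨hm, hb, he⟩ := hr
  rcases eq_or_lt_of_le hb with h1 | h2
  · -- b = 1
    have : m ^ b.toNat = m ^ 1 := by rw [← h1]; norm_num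
    simp [this] at he; omega
  · -- 2 ≤ b: m*m ≤ m^b = n < a*a ≤ m*m, contradiction
    have h2n : 2 ≤ b.toNat := by omega
    have hmm : m * m ≤ m ^ b.toNat := by
      calc m * m = m ^ 2 := by ring
        _ ≤ m ^ b.toNat := pow_le_pow_right₀ (by omega) h2n
    have haa : a * a ≤ m * m := by nlinarith
    omega

theorem altLoop_spec (n : Int) (hn : 2 ≤ n) :
    ∀ (k : Nat) (a : Int) (ha : 2 ≤ a), (n - a).toNat ≤ k →
      (∀ m b, IsRep n m b → a ≤ m) →
      ∃ m0 b0, altLoop n hn a ha = some (m0, b0) ∧ IsRep n m0 b0 ∧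
        ∀ m b, IsRep n m b → m0 ≤ m := by
  intro k
  induction k with
  | zero =>
    intro a ha hk hinv
    have hna : n ≤ a := by omega
    have hbig : ¬ a * a ≤ n := by nlinarith
    obtain ⟨hrep, hmin⟩ := altLoop_base n a hn ha hbig hinv
    exact ⟨n, 1, by rw [altLoop, dif_neg hbig], hrep, hmin⟩
  | succ k ih =>
    intro a ha hk hinv
    by_cases hle : a * a ≤ n
    · obtain ⟨e, heq, hbe, hge, hsm⟩ :=
        growPow_spec n a ha (n - a).toNat a 1 (by omega) (le_refl _) (le_refl 1)
      have hpe : a * a ^ (e - 1).toNat = a ^ e.toNat := by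
        have h1 : e.toNat = (e - 1).toNat + 1 := by omega
        rw [h1, pow_succ]
        ring
      rw [altLoop]
      simp only [dif_pos hle, heq]
      by_cases hP : a * a ^ (e - 1).toNat = n
      · rw [if_pos hP]
        refine ⟨a, e, rfl, ⟨ha, by omega, by rw [← hpe]; exact hP⟩, hinv⟩
      · rw [if_neg hP]
        have han : a < n := by nlinarith
        apply ih (a + 1) (by omega) (by omega)
        intro m b hr
        have ham := hinv m b hr
        rcases eq_or_lt_of_le ham with hma | hma
        · exfalso
          obtain ⟨hm2, hb1, hpow⟩ := hr
          rw [← hma] at hpow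
          rcases lt_or_ge b e with hbe' | hbe'
          · -- exponent b < e : a^b < n, contradicting a^b = n
            obtain ⟨i, hi⟩ : ∃ i, b.toNat = i + 1 := ⟨b.toNat - 1, by omega⟩
            have hj : ((i : Nat) : Int) < e - 1 := by omega
            have hlt := hsm i hj
            have hsp : a ^ b.toNat = a * a ^ i := by
              rw [hi, pow_succ]
              ring
            omega
          · -- exponent b ≥ e : a^b ≥ a^e > n (since a^e ≥ n and a^e ≠ n)
            have h1 : a ^ e.toNat ≤ a ^ b.toNat :=
              pow_le_pow_right₀ (by omega) (by omega)
            rw [← hpe] at h1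
            omega
        · omega
    · obtain ⟨hrep, hmin⟩ := altLoop_base n a hn ha hle hinv
      exact ⟨n, 1, by rw [altLoop, dif_neg hle], hrep, hmin⟩

theorem alt_spec (n : Int) (hn : 2 ≤ n) :
    ∃ m0 b0, ilog_alt n = some (m0, b0) ∧ IsRep n m0 b0 ∧
      ∀ m b, IsRep n m b → m0 ≤ m := by
  have h0 : ¬ n ≤ 0 := by omega
  have h1 : ¬ n = 1 := by omega
  have halt : ilog_alt n = altLoop n (by omega) 2 (by omega) := by
    rw [ilog_alt, dif_neg h0, dif_neg h1]
  rw [halt]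
  exact altLoop_spec n (by omega) (n - 2).toNat 2 (by omega) (by omega)
    (fun m b hr => hr.1)

theorem ilog_one : ilog 1 = some (1, 1) := by
  show ilogOuter 1 (PySem.Int.bitLength 1 : Int)
      (PySem.List.pyRange (PySem.Int.bitLength 1 : Int) 0 (-1)) = some (1, 1)
  have hbl : (PySem.Int.bitLength 1 : Int) = 1 := by decide
  rw [hbl, pyRange_desc 1 (by norm_num)]
  have hdl : descList (1 : Int).toNat = [1] := by
    show descList 1 = [1]
    simp [descList]
  rw [hdl, ilogOuter]
  have hfd : PySem.Int.floordiv 1 1 = 1 := by decide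
  have hs : ilogSearch 1 1 1 ((2 : Int) ^ ((PySem.Int.floordiv 1 1 + 1).toNat)) = some 1 := by
    apply search_some 1 1 (le_refl 1) 4 1 _ 1 (by decide) (le_refl 1) (le_refl 1)
      (by decide) (by norm_num)
  rw [hs]

-- ===== VERDICT (by name: the statement is the Claim_ definition above) =====
theorem ilog_spec : Claim_equal_ilog := by
  intro n _
  show ilog n = ilog_alt n
  rcases le_or_gt n 0 with hn | hn
  · rw [ilog_alt, dif_pos hn]
    show ilogOuter n _ (PySem.List.pyRange _ 0 (-1)) = none
    rw [pyRange_desc _ (by positivity)]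
    exact outer_none_nonpos n _ hn _
  · rcases eq_or_lt_of_le (by omega : (1:Int) ≤ n) with h1 | h2
    · rw [← h1, ilog_one, ilog_alt]; norm_num
    · have hn2 : 2 ≤ n := h2
      obtain ⟨m0, b0, halt, hrep, hmin⟩ := alt_spec n hn2
      rw [halt]
      exact ilog_eq n m0 b0 hn2 hrep
        (fun m b hr => rep_exp_le n m0 b0 m b hrep hr (hmin m b hr))
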